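-- pv_equiv track=rewrite | github.com/Dreyrden/NTR14 | src/aerospace_toolbox/plotmodule.py | generate_markers
-- ===== SOURCE A (Python) =====
-- def generate_markers(numpts):
--     markers = ['o', 'd', 'x', '+']
--     colors  = ['b', 'r', 'g', 'y']
--     mylist  = []
--     count   = 1
--     #  run a while-loop until all points have a marker
--     #+ and a color associated with them
--     while count <= numpts:
--         #  select a marker
--         for i in range(len(markers)):
--             #  select a color
--             for j in range(len(colors)):
--                 if count > numpts: return mylist
--                 else: count += 1; mylist.append([markers[i], colors[j]])
-- ===== SOURCE B (Python) =====
-- def generate_markers(numpts):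
--     markers = ['o', 'd', 'x', '+']
--     colors  = ['b', 'r', 'g', 'y']
--     combos = [[m, c] for m in markers for c in colors]
--     return [list(combos[i % 16]) for i in range(numpts)]
-- ===== Notes on version B (the rewrite author's own statement) =====
-- stated objective: idiomatic
-- what changed: Replaces A's while-loop with nested index loops, a running count and an early return by a precomputed 16-entry pattern table indexed by i % 16 inside a single range comprehension.
-- outside the precondition, e.g. on generate_markers(0): A returns None, B returns []
import Mathlib
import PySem

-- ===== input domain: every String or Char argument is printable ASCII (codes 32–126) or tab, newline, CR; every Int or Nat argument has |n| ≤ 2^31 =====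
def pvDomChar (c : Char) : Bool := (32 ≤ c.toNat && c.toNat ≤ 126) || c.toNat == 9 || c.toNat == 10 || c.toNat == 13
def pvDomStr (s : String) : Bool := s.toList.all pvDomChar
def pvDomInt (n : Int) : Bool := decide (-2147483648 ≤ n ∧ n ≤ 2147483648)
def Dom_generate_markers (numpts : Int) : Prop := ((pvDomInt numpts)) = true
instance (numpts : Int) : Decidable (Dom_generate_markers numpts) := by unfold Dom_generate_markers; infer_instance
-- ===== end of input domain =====

-- B replaces A's while-loop/count/early-return machinery by a precomputed 16-entry
-- pattern table indexed by i % 16 in a single comprehension (idiomatic, same cost).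

-- ===== PORT A =====
-- the 16 (marker, color) pairs visited by the two nested 'for' loops, in order
def pvA_pairs : List (String × String) :=
  [("o","b"),("o","r"),("o","g"),("o","y"),
   ("d","b"),("d","r"),("d","g"),("d","y"),
   ("x","b"),("x","r"),("x","g"),("x","y"),
   ("+","b"),("+","r"),("+","g"),("+","y")]

-- one pass of the two nested 'for' loops: either the early 'return mylist'
-- (.error) or both loops finish (.ok) with the updated count and mylist
def pvA_body (numpts : Int) : List (String × String) → Int → List (List String) →
    Except (List (List String)) (Int × List (List String))
  | [], count, mylist => .ok (count, mylist)
  | (m, c) :: rest, count, mylist =>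
      if count > numpts then .error mylist
      else pvA_body numpts rest (count + 1) (mylist ++ [[m, c]])

-- the 'while count <= numpts' loop; fuel only makes the recursion structural
-- (each entered iteration raises count by 16, so numpts.toNat + 1 never runs out)
def pvA_while (fuel : Nat) (numpts count : Int) (mylist : List (List String)) :
    List (List String) :=
  match fuel with
  | 0 => mylist
  | fuel + 1 =>
      if count ≤ numpts then
        match pvA_body numpts pvA_pairs count mylist with
        | .error l => l
        | .ok (count', mylist') => pvA_while fuel numpts count' mylist'
      else mylist

def generate_markers (numpts : Int) : List (List String) :=
  pvA_while (numpts.toNat + 1) numpts 1 []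

-- ===== PORT B =====
def generate_markers_alt (numpts : Int) : List (List String) :=
  let markers := ["o", "d", "x", "+"]
  let colors  := ["b", "r", "g", "y"]
  let combos := markers.flatMap (fun m => colors.map (fun c => [m, c]))
  (PySem.List.pyRange 0 numpts 1).map
    (fun i => PySem.List.pyGetD combos (PySem.Int.mod i 16) [])

-- ===== PRECONDITION & SPEC =====
-- Pre_ excludes numpts ≤ 0 and positive multiples of 16: there Python A's while-loop
-- (or its final iteration) ends without hitting the early return, so A falls off the
-- end and returns None instead of a list of the declared type.
def Pre_generate_markers (numpts : Int) : Prop := 1 ≤ numpts ∧ numpts % 16 ≠ 0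
instance (numpts : Int) : Decidable (Pre_generate_markers numpts) := by
  unfold Pre_generate_markers; infer_instance

def pvWitness_generate_markers : Int := (3)

def Spec_generate_markers (numpts : Int) (out : List (List String)) : Prop := out = generate_markers_alt numpts
instance (numpts : Int) (out : List (List String)) : Decidable (Spec_generate_markers numpts out) := by unfold Spec_generate_markers; infer_instance

-- ===== CLAIM (what is proved, stated in full; the proofs are below) =====
def Claim_equal_generate_markers : Prop := ∀ (numpts : Int), Dom_generate_markers numpts → Pre_generate_markers numpts → Spec_generate_markers numpts (generate_markers numpts)

-- ===== LEMMAS AND PROOFS =====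

-- the 16 pairs as the lists A appends (= B's combos table)
def pvP16 : List (List String) := pvA_pairs.map (fun p => [p.1, p.2])

-- the common target value, over Nat indices
def pvTarget (n : Nat) : List (List String) :=
  (List.range n).map (fun j => pvP16.getD (j % 16) [])

theorem pvA_body_spec (numpts : Int) (ps : List (String × String))
    (count : Int) (l : List (List String)) (h : count ≤ numpts + 1) :
    pvA_body numpts ps count l =
      if count + ps.length ≤ numpts + 1 then
        .ok (count + ps.length, l ++ ps.map (fun p => [p.1, p.2]))
      else .error (l ++ (ps.take (numpts + 1 - count).toNat).map (fun p => [p.1, p.2])) := by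
  induction ps generalizing count l with
  | nil => simp [pvA_body]; omega
  | cons p rest ih =>
      obtain ⟨m, c⟩ := p
      by_cases hc : count > numpts
      · have h1 : ¬ (count + ((m, c) :: rest).length ≤ numpts + 1) := by
          simp only [List.length_cons]; omega
        have h2 : (numpts + 1 - count).toNat = 0 := by omega
        simp [pvA_body, hc, h2]
        omega
      · have hc' : count + 1 ≤ numpts + 1 := by omega
        have h2 : (numpts + 1 - count).toNat = (numpts + 1 - (count + 1)).toNat + 1 := by omega
        simp only [pvA_body, if_neg hc, ih (count + 1) _ hc', List.length_cons, h2,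
          List.take_succ_cons, List.map_cons]
        by_cases h3 : count + 1 + rest.length ≤ numpts + 1
        · have h4 : count + (rest.length + 1) ≤ numpts + 1 := by omega
          simp [h3, if_pos h4, List.append_assoc]
          omega
        · have h4 : ¬ (count + (rest.length + 1) ≤ numpts + 1) := by omega
          simp [h3, if_neg h4, List.append_assoc]

-- a ≡ 0 (mod 16) chunk of the target pattern
theorem pvChunk (a d : Nat) (ha : a % 16 = 0) (hd : d ≤ 16) :
    (List.range' a d).map (fun j => pvP16.getD (j % 16) []) = pvP16.take d := by
  apply List.ext_getElem
  · simp [pvP16, pvA_pairs]; omega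
  · intro i h1 h2
    simp only [List.getElem_map, List.getElem_range', List.getElem_take]
    have hi : i < d := by simpa using h1
    have : (a + 1 * i) % 16 = i := by omega
    rw [this]
    have hi16 : i < pvP16.length := by simp [pvP16, pvA_pairs]; omega
    simp [List.getD_eq_getElem?_getD, List.getElem?_eq_getElem hi16]

theorem pvDrop_target (n a : Nat) (_h : a ≤ n) :
    (pvTarget n).drop a = (List.range' a (n - a)).map (fun j => pvP16.getD (j % 16) []) := by
  unfold pvTarget
  rw [← List.map_drop, List.range_eq_range', List.drop_range']
  simp

theorem pvA_while_spec (numpts : Int) (n : Nat) (hn : numpts = n) :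
    ∀ (fuel k : Nat) (l : List (List String)), 16 * k ≤ n → n ≤ 16 * k + 16 * fuel →
      pvA_while fuel numpts (16 * k + 1) l = l ++ (pvTarget n).drop (16 * k) := by
  intro fuel
  induction fuel with
  | zero =>
      intro k l h1 h2
      have : n = 16 * k := by omega
      simp [pvA_while, this, pvTarget]
  | succ fuel ih =>
      intro k l h1 h2
      by_cases hg : (16 * k + 1 : Int) ≤ numpts
      · have hkn : 16 * k + 1 ≤ n := by omega
        have hle : (16 * k + 1 : Int) ≤ numpts + 1 := by omega
        rw [pvA_while, if_pos hg, pvA_body_spec numpts pvA_pairs _ l hle]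
        have hlen : pvA_pairs.length = 16 := by decide
        by_cases hfull : (16 * k + 1 : Int) + pvA_pairs.length ≤ numpts + 1
        · -- full pass: 16(k+1) ≤ n
          have hfn : 16 * (k + 1) ≤ n := by rw [hlen] at hfull; omega
          have hstep : (16 * k + 1 : Int) + pvA_pairs.length = 16 * (k + 1) + 1 := by
            rw [hlen]; push_cast; ring
          rw [if_pos hfull, hstep]
          change pvA_while fuel numpts (16 * ((k : Int) + 1) + 1)
            (l ++ pvA_pairs.map (fun p => [p.1, p.2])) = _
          have hcast : (16 * ((k : Int) + 1) + 1) = 16 * (((k + 1 : Nat)) : Int) + 1 := by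
            push_cast; ring
          rw [hcast, ih (k + 1) _ hfn (by omega)]
          rw [pvDrop_target n (16 * k) (by omega), pvDrop_target n (16 * (k+1)) hfn]
          have hsplit : n - 16 * k = 16 + (n - 16 * (k + 1)) := by omega
          rw [hsplit, ← List.range'_append]
          have h16 : 16 * k + 1 * 16 = 16 * (k + 1) := by ring
          rw [h16, List.map_append, pvChunk (16 * k) 16 (by omega) (le_refl _)]
          have hP : pvA_pairs.map (fun p => [p.1, p.2]) = pvP16.take 16 := by decide
          rw [hP, List.append_assoc]
        · -- partial pass: early return with d = n - 16k remaining pairs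
          rw [if_neg hfull]
          have hd : (numpts + 1 - (16 * k + 1)).toNat = n - 16 * k := by omega
          have hdle : n - 16 * k ≤ 16 := by rw [hlen] at hfull; omega
          rw [hd, pvDrop_target n (16 * k) (by omega)]
          rw [pvChunk (16 * k) (n - 16 * k) (by omega) hdle]
          have : (pvA_pairs.take (n - 16 * k)).map (fun p => [p.1, p.2]) =
              pvP16.take (n - 16 * k) := by
            simp [pvP16, List.map_take]
          rw [this]
      · have : n ≤ 16 * k := by omega
        have hn' : n = 16 * k := by omega
        rw [pvA_while, if_neg hg]
        simp [hn', pvTarget]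

theorem pvB_eq (numpts : Int) : generate_markers_alt numpts = pvTarget numpts.toNat := by
  unfold generate_markers_alt pvTarget
  rw [PySem.List.pyRange_one]
  simp only [List.map_map, Int.sub_zero]
  apply List.map_congr_left
  intro j hj
  simp only [Function.comp]
  have hmod : PySem.Int.mod ((0 : Int) + j) 16 = ((j % 16 : Nat) : Int) := by
    rw [Int.zero_add]
    exact_mod_cast PySem.Int.mod_natCast j 16
  rw [hmod, PySem.List.pyGetD_natCast]
  rfl

-- ===== VERDICT (by name: the statement is the Claim_ definition above) =====
theorem generate_markers_spec : Claim_equal_generate_markers := by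
  intro numpts _ hpre
  obtain ⟨h1, -⟩ := hpre
  unfold Spec_generate_markers generate_markers
  rw [pvB_eq]
  have hw := pvA_while_spec numpts numpts.toNat (by omega) (numpts.toNat + 1) 0 []
    (by omega) (by omega)
  simpa using hw
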